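-- pv_equiv track=rewrite | github.com/Thridioux/LeetCode-Solutions | 2099-FindSubsequenceOfLenghtKWithTheLargestSum/main.py | maxSubsequence
-- ===== SOURCE A (Python) =====
-- def maxSubsequence(nums, k: int):
--     #return any such subsequence of length k with the largest sum
--     if k == 0:
--         return []
--     if k >= len(nums):
--         return nums
--     # Sort the nums with their indices
--     sorted_nums = sorted((num, i) for i, num in enumerate(nums))
--     # Get the k largest elements and their indices
--     largest_k = sorted_nums[-k:]
--     # Sort the largest k elements by their original indices
--     largest_k.sort(key=lambda x: x[1])
--     # Return only the values of the largest k elements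
--     return [num for num, _ in largest_k]
-- ===== SOURCE B (Python) =====
-- def maxSubsequence(nums, k: int):
--     # Threshold selection: one value-only sort picks the k-th largest value,
--     # then a single right-to-left scan keeps every element above it and the
--     # rightmost remaining copies of the threshold value itself.
--     if k == 0:
--         return []
--     n = len(nums)
--     if k >= n:
--         return nums
--     vals = sorted(nums)
--     thr = vals[n - k]
--     ties = k - sum(1 for v in vals[n - k:] if v > thr)
--     out = []
--     for v in reversed(nums):
--         if v > thr:
--             out.append(v)
--         elif v == thr and ties > 0:
--             out.append(v)
--             ties -= 1
--     out.reverse()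
--     return out
-- ===== Notes on version B (the rewrite author's own statement) =====
-- stated objective: faster
-- what changed: A sorts all (value,index) tuples and then re-sorts the top-k slice by index; B sorts the plain values once to find the k-th largest value as a threshold and emits the answer in one right-to-left scan that keeps every element above the threshold and the rightmost remaining copies of the threshold itself, with no tuple building and no second sort.
-- outside the precondition, e.g. on maxSubsequence([1, 2, 3], -1): A returns [2, 3], B raises IndexError
import Mathlib
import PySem

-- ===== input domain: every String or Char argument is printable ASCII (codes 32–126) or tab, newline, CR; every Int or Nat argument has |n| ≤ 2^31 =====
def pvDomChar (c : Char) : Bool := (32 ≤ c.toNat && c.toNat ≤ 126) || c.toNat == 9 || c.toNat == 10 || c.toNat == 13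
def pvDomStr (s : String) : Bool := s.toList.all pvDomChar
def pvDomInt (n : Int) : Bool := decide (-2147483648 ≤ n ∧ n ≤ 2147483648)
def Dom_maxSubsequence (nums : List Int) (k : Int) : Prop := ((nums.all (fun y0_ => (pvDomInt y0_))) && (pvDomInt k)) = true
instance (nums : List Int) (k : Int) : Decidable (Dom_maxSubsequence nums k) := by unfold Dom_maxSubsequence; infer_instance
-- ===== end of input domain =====

-- B replaces A's tuple sort + second sort by one value-only sort that picks the k-th
-- largest value as a threshold and a single right-to-left scan (objective: faster).

-- ===== PORT A =====
def maxSubsequence (nums : List Int) (k : Int) : List Int :=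
  if k == 0 then []
  else if k ≥ (nums.length : Int) then nums
  else
    -- sorted((num, i) for i, num in enumerate(nums))
    let sorted_nums := PySem.List.sorted2
      ((PySem.List.enumerate nums).map (fun p => (p.2, p.1)))
      (fun x => x.1) (fun x => x.2) false
    -- largest_k = sorted_nums[-k:]
    let largest_k := PySem.List.slice sorted_nums (some (-k)) none
    -- largest_k.sort(key=lambda x: x[1])
    let largest_k2 := PySem.List.sorted largest_k (fun x => x.2) false
    largest_k2.map (fun x => x.1)

-- ===== PORT B =====
def maxSubsequence_alt (nums : List Int) (k : Int) : List Int :=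
  if k == 0 then []
  else if k ≥ (nums.length : Int) then nums
  else
    let n : Int := (nums.length : Int)
    let vals := PySem.List.sorted nums (fun x => x) false
    -- thr = vals[n - k]; in range whenever 0 ≤ k (Pre_) and the branch guards hold
    let thr := PySem.List.pyGetD vals (n - k) 0
    -- ties = k - sum(1 for v in vals[n - k:] if v > thr)
    let ties := k - ((PySem.List.slice vals (some (n - k)) none).countP (fun v => decide (thr < v)) : Int)
    -- right-to-left scan over reversed(nums), then reverse the collected output
    let st := nums.reverse.foldl
      (fun (st : List Int × Int) v =>
        if thr < v then (st.1 ++ [v], st.2)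
        else if v = thr ∧ 0 < st.2 then (st.1 ++ [v], st.2 - 1)
        else st) ([], ties)
    st.1.reverse

-- ===== PRECONDITION & SPEC =====
-- Pre_ excludes negative k (outside the task's natural domain of counts): there A returns an
-- accidental value via Python's negative-slice wraparound, while B's vals[n - k] raises IndexError.
def Pre_maxSubsequence (_nums : List Int) (k : Int) : Prop := 0 ≤ k
instance (nums : List Int) (k : Int) : Decidable (Pre_maxSubsequence nums k) := by unfold Pre_maxSubsequence; infer_instance

def pvWitness_maxSubsequence : List Int × Int := ([3, 1, 2, 1], 2)

def Spec_maxSubsequence (nums : List Int) (k : Int) (out : List Int) : Prop := out = maxSubsequence_alt nums k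
instance (nums : List Int) (k : Int) (out : List Int) : Decidable (Spec_maxSubsequence nums k out) := by unfold Spec_maxSubsequence; infer_instance

-- ===== CLAIM (what is proved, stated in full; the proofs are below) =====
def Claim_equal_maxSubsequence : Prop := ∀ (nums : List Int) (k : Int), Dom_maxSubsequence nums k → Pre_maxSubsequence nums k → Spec_maxSubsequence nums k (maxSubsequence nums k)

-- ===== LEMMAS AND PROOFS =====

-- the list of (value, index) pairs A sorts
def pvPairs (nums : List Int) : List (Int × Int) :=
  (PySem.List.enumerate nums).map (fun p => (p.2, p.1))

-- Python's lexicographic tuple order on (value, index)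
def pvKey (p : Int × Int) : Int ×ₗ Int := toLex (p.1, p.2)

-- the right-to-left scan of B's loop, extracted as structural recursion
def pvScan (thr : Int) : List Int → Int → List Int
  | [], _ => []
  | v :: l, t =>
    if thr < v then v :: pvScan thr l t
    else if v = thr ∧ 0 < t then v :: pvScan thr l (t - 1)
    else pvScan thr l t

lemma pvKey_lt_iff (a b : Int × Int) :
    pvKey a < pvKey b ↔ (a.1 < b.1 ∨ (a.1 = b.1 ∧ a.2 < b.2)) := by
  simpa [pvKey] using Prod.Lex.lt_iff (x := toLex (a.1, a.2)) (y := toLex (b.1, b.2))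

lemma pvKey_le_iff (a b : Int × Int) :
    pvKey a ≤ pvKey b ↔ (a.1 < b.1 ∨ (a.1 = b.1 ∧ a.2 ≤ b.2)) := by
  simpa [pvKey] using Prod.Lex.le_iff (x := toLex (a.1, a.2)) (y := toLex (b.1, b.2))

lemma pvKey_inj (a b : Int × Int) (h : pvKey a = pvKey b) : a = b := by
  have h1 := le_of_eq h
  have h2 := le_of_eq h.symm
  rw [pvKey_le_iff] at h1 h2
  have : a.1 = b.1 ∧ a.2 = b.2 := by omega
  exact Prod.ext this.1 this.2

-- Python's tuple sort of (value, index) pairs is the lexicographic-key sort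
lemma pv_sorted2_eq (xs : List (Int × Int)) :
    PySem.List.sorted2 xs (fun x => x.1) (fun x => x.2) false
      = PySem.List.sorted xs pvKey false := by
  rw [PySem.List.sorted_eq_foldl_insertBy]
  simp only [PySem.List.sorted2, Bool.false_eq_true, if_false]
  congr 1
  funext acc x
  congr 1
  funext a b
  rw [show decide (pvKey a < pvKey b)
        = decide (a.1 < b.1 ∨ (a.1 = b.1 ∧ a.2 < b.2)) from
      decide_eq_decide.mpr (pvKey_lt_iff a b)]
  by_cases h1 : a.1 < b.1 <;> by_cases h2 : b.1 < a.1 <;> by_cases h3 : a.2 < b.2 <;>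
    simp [h1, h2, h3] <;> omega

lemma pvPairs_map_fst (nums : List Int) : (pvPairs nums).map (fun p => p.1) = nums := by
  simp only [pvPairs, List.map_map]
  exact PySem.List.map_snd_enumerate nums 0

lemma pvPairs_length (nums : List Int) : (pvPairs nums).length = nums.length := by
  simp [pvPairs, PySem.List.length_enumerate]

lemma pvPairs_pairwise_snd (nums : List Int) :
    (pvPairs nums).Pairwise (fun a b => a.2 < b.2) := by
  exact (PySem.List.pairwise_lt_enumerate nums 0).map _ (by intro a b h; simpa using h)

lemma pvPairs_nodup (nums : List Int) : (pvPairs nums).Nodup := by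
  exact (pvPairs_pairwise_snd nums).imp (by intro a b h hab; subst hab; exact lt_irrefl _ h)

lemma pvPairs_snd_bound (nums : List Int) :
    ∀ p ∈ pvPairs nums, 0 ≤ p.2 ∧ p.2 < (nums.length : Int) := by
  intro p hp
  simp only [pvPairs, List.mem_map] at hp
  obtain ⟨q, hq, rfl⟩ := hp
  obtain ⟨j, hj, rfl⟩ := (PySem.List.mem_enumerate_iff nums 0 q).mp hq
  refine ⟨by simp, by simp; omega⟩

lemma pvPairs_append (l : List Int) (v : Int) :
    pvPairs (l ++ [v]) = pvPairs l ++ [(v, (l.length : Int))] := by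
  simp [pvPairs, PySem.List.enumerate_append, PySem.List.enumerate_cons,
    PySem.List.enumerate_nil]

-- membership in drop/take of a strictly key-sorted list
lemma pv_mem_drop_iff {α κ : Type} [LinearOrder κ] (key : α → κ) (l : List α)
    (hp : l.Pairwise (fun a b => key a < key b)) (d : Nat) (hd : d < l.length) (x : α) :
    x ∈ l.drop d ↔ x ∈ l ∧ key l[d] ≤ key x := by
  have hmono := List.pairwise_iff_getElem.mp hp
  constructor
  · intro hx
    obtain ⟨i, hi, rfl⟩ := List.mem_iff_getElem.mp hx
    rw [List.getElem_drop]
    have hdi : d + i < l.length := by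
      have := hi; simp only [List.length_drop] at this; omega
    refine ⟨List.getElem_mem _, ?_⟩
    rcases Nat.eq_zero_or_pos i with h0 | h0
    · subst h0; simp
    · exact le_of_lt (hmono d (d + i) hd hdi (by omega))
  · rintro ⟨hx, hle⟩
    obtain ⟨j, hj, rfl⟩ := List.mem_iff_getElem.mp hx
    by_cases hjd : d ≤ j
    · refine List.mem_iff_getElem.mpr ⟨j - d, ?_, ?_⟩
      · simp only [List.length_drop]; omega
      · rw [List.getElem_drop]; congr 1; omega
    · exact absurd hle (not_le.mpr (hmono j d hj hd (by omega)))

lemma pv_mem_take_lt {α κ : Type} [LinearOrder κ] (key : α → κ) (l : List α)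
    (hp : l.Pairwise (fun a b => key a < key b)) (d : Nat) (hd : d < l.length) (x : α)
    (hx : x ∈ l.take d) : key x < key l[d] := by
  have hmono := List.pairwise_iff_getElem.mp hp
  obtain ⟨i, hi, rfl⟩ := List.mem_iff_getElem.mp hx
  have hi' : i < d := by simp only [List.length_take] at hi; omega
  rw [List.getElem_take]
  exact hmono i d (by omega) hd hi'

-- B's fold is the extracted scan
lemma pvScan_foldl (thr : Int) (l : List Int) (out : List Int) (t : Int) :
    (l.foldl (fun (st : List Int × Int) v =>
        if thr < v then (st.1 ++ [v], st.2)
        else if v = thr ∧ 0 < st.2 then (st.1 ++ [v], st.2 - 1)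
        else st) (out, t)).1 = out ++ pvScan thr l t := by
  induction l generalizing out t with
  | nil => simp [pvScan]
  | cons v l ih =>
    simp only [List.foldl_cons, pvScan]
    by_cases h1 : thr < v
    · simp only [if_pos h1, ih]; simp
    · by_cases h2 : v = thr ∧ 0 < t
      · simp only [if_neg h1, if_pos h2, ih]; simp
      · simp only [if_neg h1, if_neg h2, ih]

lemma pvScan_cons_gt {thr v : Int} (l : List Int) (t : Int) (h : thr < v) :
    pvScan thr (v :: l) t = v :: pvScan thr l t := by
  simp [pvScan, h]

lemma pvScan_cons_tie {thr v : Int} (l : List Int) (t : Int) (_h1 : ¬ thr < v) (h2 : v = thr)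
    (h3 : 0 < t) : pvScan thr (v :: l) t = v :: pvScan thr l (t - 1) := by
  simp [pvScan, h2, h3]

lemma pvScan_cons_skip {thr v : Int} (l : List Int) (t : Int) (h1 : ¬ thr < v)
    (h2 : ¬ (v = thr ∧ 0 < t)) : pvScan thr (v :: l) t = pvScan thr l t := by
  simp only [pvScan, if_neg h1, if_neg h2]

-- the scan with the correct tie budget is the lexicographic filter
lemma pvScan_eq_filter (thr i0 : Int) (l : List Int) :
    (pvScan thr l.reverse
        (((pvPairs l).countP (fun p => decide (p.1 = thr ∧ i0 ≤ p.2)) : Int))).reverse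
      = ((pvPairs l).filter
          (fun p => decide (thr < p.1 ∨ (p.1 = thr ∧ i0 ≤ p.2)))).map (fun p => p.1) := by
  induction l using List.reverseRecOn with
  | nil => simp [pvPairs, PySem.List.enumerate_nil, pvScan]
  | append_singleton l v ih =>
    rw [pvPairs_append, List.reverse_append]
    simp only [List.reverse_singleton, List.singleton_append, List.countP_append,
      List.filter_append, List.map_append, List.countP_singleton, List.filter_singleton]
    by_cases h1 : thr < v
    · have hvne : ¬ v = thr := by omega
      rw [show (decide ((v, (l.length : Int)).1 = thr ∧ i0 ≤ (v, (l.length : Int)).2)) = false by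
            simp [hvne]]
      rw [if_neg (by simp), Nat.add_zero,
        pvScan_cons_gt _ _ h1, List.reverse_cons, ih]
      simp [h1]
    · by_cases h2 : v = thr
      · by_cases h3 : i0 ≤ (l.length : Int)
        · rw [show (decide ((v, (l.length : Int)).1 = thr ∧ i0 ≤ (v, (l.length : Int)).2)) = true by
              simp [h2, h3]]
          rw [if_pos rfl,
            pvScan_cons_tie _ _ h1 h2 (by positivity),
            show (((List.countP (fun p => decide (p.1 = thr ∧ i0 ≤ p.2)) (pvPairs l) + 1 : Nat) : Int)) - 1
              = ((List.countP (fun p => decide (p.1 = thr ∧ i0 ≤ p.2)) (pvPairs l) : Nat) : Int) by push_cast; ring,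
            List.reverse_cons, ih]
          simp [h2, h3]
        · have hzero : List.countP (fun p => decide (p.1 = thr ∧ i0 ≤ p.2)) (pvPairs l) = 0 := by
            rw [List.countP_eq_zero]
            intro p hp
            have hb := pvPairs_snd_bound l p hp
            simp only [decide_eq_true_eq, not_and]
            intro _; omega
          have ih' := hzero ▸ ih
          rw [show (decide ((v, (l.length : Int)).1 = thr ∧ i0 ≤ (v, (l.length : Int)).2)) = false by
              simp; intro _; omega]
          rw [if_neg (by simp), Nat.add_zero, hzero,
            pvScan_cons_skip _ _ h1 (by simp), ih']
          have : (decide (thr < v ∨ v = thr ∧ i0 ≤ (l.length : Int))) = false := by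
            simp [h1]; omega
          simp [this]
      · rw [show (decide ((v, (l.length : Int)).1 = thr ∧ i0 ≤ (v, (l.length : Int)).2)) = false by
            simp [h2]]
        rw [if_neg (by simp), Nat.add_zero,
          pvScan_cons_skip _ _ h1 (by simp [h2]), ih]
        simp [h1, h2]

-- the main branch: A's sort-slice-sort equals B's threshold scan
lemma pv_main (nums : List Int) (k : Int) (hk1 : 1 ≤ k) (hkn : k < (nums.length : Int)) :
    maxSubsequence nums k = maxSubsequence_alt nums k := by
  have hge : ¬ k ≥ (nums.length : Int) := by omega
  have e0 : (k == 0) = false := by simp; omega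
  -- the sorted pair list and its properties
  set S := PySem.List.sorted (pvPairs nums) pvKey false with hSdef
  have hperm : S.Perm (pvPairs nums) := PySem.List.sorted_perm _ _ _
  have hlenS : S.length = nums.length := by rw [hperm.length_eq, pvPairs_length]
  have hnodup : S.Nodup := hperm.nodup_iff.mpr (pvPairs_nodup nums)
  have hpw : S.Pairwise (fun a b => pvKey a < pvKey b) := by
    have hle : S.Pairwise (fun a b => pvKey a ≤ pvKey b) := PySem.List.sorted_pairwise _ _
    exact (hle.and hnodup).imp (fun h => lt_of_le_of_ne h.1 (fun he => h.2 (pvKey_inj _ _ he)))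
  set d : Nat := nums.length - k.toNat with hddef
  have hdS : d < S.length := by rw [hlenS]; omega
  set t0 : Int × Int := S[d]'hdS with ht0def
  have hmemdrop : ∀ p, p ∈ S.drop d ↔ p ∈ pvPairs nums ∧ pvKey t0 ≤ pvKey p := by
    intro p
    rw [pv_mem_drop_iff pvKey S hpw d hdS p, hperm.mem_iff, ht0def]
  have hdropnd : (S.drop d).Nodup := List.Nodup.sublist (List.drop_sublist _ _) hnodup
  -- ===== A's value =====
  have hsliceA : PySem.List.slice S (some (-k)) none = S.drop d := by
    rw [show -k = -((k.toNat : Int)) by omega,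
      PySem.List.slice_from_neg_natCast S k.toNat (by omega), hlenS]
  have hsorted2 : PySem.List.sorted (S.drop d) (fun x => x.2) false
      = (pvPairs nums).filter (fun p => decide (t0.1 < p.1 ∨ (p.1 = t0.1 ∧ t0.2 ≤ p.2))) := by
    have hfilter_eq : (pvPairs nums).filter (fun p => decide (p ∈ S.drop d))
        = (pvPairs nums).filter (fun p => decide (t0.1 < p.1 ∨ (p.1 = t0.1 ∧ t0.2 ≤ p.2))) := by
      apply List.filter_congr
      intro p hp
      rw [decide_eq_decide, hmemdrop p, pvKey_le_iff]
      constructor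
      · rintro ⟨-, h⟩; omega
      · intro h; exact ⟨hp, by omega⟩
    rw [← hfilter_eq]
    apply PySem.List.sorted_eq_of_perm_of_pairwise_lt
    · rw [List.perm_ext_iff_of_nodup (List.Nodup.filter _ (pvPairs_nodup nums)) hdropnd]
      intro p
      rw [List.mem_filter]
      simp only [decide_eq_true_eq]
      constructor
      · rintro ⟨-, h⟩; exact h
      · intro h; exact ⟨((hmemdrop p).mp h).1, h⟩
    · exact List.Pairwise.filter _ (pvPairs_pairwise_snd nums)
  have hA : maxSubsequence nums k
      = ((pvPairs nums).filter
          (fun p => decide (t0.1 < p.1 ∨ (p.1 = t0.1 ∧ t0.2 ≤ p.2)))).map (fun p => p.1) := by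
    simp only [maxSubsequence, e0, Bool.false_eq_true, if_false, if_neg hge]
    rw [pv_sorted2_eq, show (PySem.List.enumerate nums).map (fun p => (p.2, p.1)) = pvPairs nums
        from rfl, ← hSdef, hsliceA, hsorted2]
  -- ===== B's value =====
  have hvals : PySem.List.sorted nums (fun x => x) false = S.map (fun p => p.1) := by
    apply PySem.List.sorted_id_eq_of_perm_of_pairwise
    · exact (hperm.map _).trans (by rw [pvPairs_map_fst])
    · rw [List.pairwise_map]
      exact hpw.imp (fun h => by rw [pvKey_lt_iff] at h; omega)
  have hdkInt : (nums.length : Int) - k = (d : Int) := by omega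
  have hthr : PySem.List.pyGetD (PySem.List.sorted nums (fun x => x) false)
      ((nums.length : Int) - k) 0 = t0.1 := by
    rw [hvals, hdkInt, PySem.List.pyGetD_natCast,
      List.getD_eq_getElem _ _ (by rw [List.length_map]; exact hdS), List.getElem_map, ht0def]
  have hsliceB : PySem.List.slice (PySem.List.sorted nums (fun x => x) false)
      (some ((nums.length : Int) - k)) none = (S.drop d).map (fun p => p.1) := by
    rw [hvals, hdkInt, PySem.List.slice_from_natCast, List.map_drop]
  have hties : k - (((S.drop d).map (fun p => p.1)).countP (fun v => decide (t0.1 < v)) : Int)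
      = (((pvPairs nums).countP (fun p => decide (p.1 = t0.1 ∧ t0.2 ≤ p.2)) : Nat) : Int) := by
    rw [List.countP_map]
    have hcomp : ((fun v => decide (t0.1 < v)) ∘ (fun p : Int × Int => p.1))
        = fun p : Int × Int => decide (t0.1 < p.1) := rfl
    rw [hcomp]
    have hlend : (S.drop d).length = k.toNat := by
      rw [List.length_drop, hlenS]; omega
    have hsplit := List.length_eq_countP_add_countP
      (fun p : Int × Int => decide (t0.1 < p.1)) (l := S.drop d)
    have hnotc : List.countP (fun p : Int × Int => decide ¬ (decide (t0.1 < p.1) = true)) (S.drop d)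
        = List.countP (fun p : Int × Int => decide (p.1 = t0.1)) (S.drop d) := by
      apply List.countP_congr
      intro p hp
      have hgep := ((hmemdrop p).mp hp).2
      rw [pvKey_le_iff] at hgep
      simp only [decide_eq_true_eq]
      omega
    have hcEq : List.countP (fun p : Int × Int => decide (p.1 = t0.1)) (S.drop d)
        = List.countP (fun p : Int × Int => decide (p.1 = t0.1 ∧ t0.2 ≤ p.2)) (pvPairs nums) := by
      rw [← List.Perm.countP_eq _ hperm,
        show List.countP (fun p : Int × Int => decide (p.1 = t0.1 ∧ t0.2 ≤ p.2)) S
          = List.countP (fun p : Int × Int => decide (p.1 = t0.1 ∧ t0.2 ≤ p.2))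
              (S.take d ++ S.drop d) by rw [List.take_append_drop],
        List.countP_append]
      have htake0 : List.countP (fun p : Int × Int => decide (p.1 = t0.1 ∧ t0.2 ≤ p.2)) (S.take d) = 0 := by
        rw [List.countP_eq_zero]
        intro p hp
        have hlt := pv_mem_take_lt pvKey S hpw d hdS p hp
        rw [← ht0def, pvKey_lt_iff] at hlt
        simp only [decide_eq_true_eq, not_and]
        intro h1; omega
      have hdropc : List.countP (fun p : Int × Int => decide (p.1 = t0.1 ∧ t0.2 ≤ p.2)) (S.drop d)
          = List.countP (fun p : Int × Int => decide (p.1 = t0.1)) (S.drop d) := by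
        apply List.countP_congr
        intro p hp
        have hgep := ((hmemdrop p).mp hp).2
        rw [pvKey_le_iff] at hgep
        simp only [decide_eq_true_eq]
        constructor
        · rintro ⟨h, -⟩; exact h
        · intro h; exact ⟨h, by omega⟩
      rw [htake0, Nat.zero_add, hdropc]
    rw [← hcEq]
    omega
  have hB : maxSubsequence_alt nums k
      = ((pvPairs nums).filter
          (fun p => decide (t0.1 < p.1 ∨ (p.1 = t0.1 ∧ t0.2 ≤ p.2)))).map (fun p => p.1) := by
    simp only [maxSubsequence_alt, e0, Bool.false_eq_true, if_false, if_neg hge]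
    rw [hthr, hsliceB, hties, pvScan_foldl t0.1 nums.reverse [] _, List.nil_append]
    exact pvScan_eq_filter t0.1 t0.2 nums
  rw [hA, hB]

-- ===== VERDICT (by name: the statement is the Claim_ definition above) =====
theorem maxSubsequence_spec : Claim_equal_maxSubsequence := by
  intro nums k _ hpre
  unfold Spec_maxSubsequence
  by_cases hk0 : k = 0
  · simp [maxSubsequence, maxSubsequence_alt, hk0]
  · by_cases hkn : k ≥ (nums.length : Int)
    · simp [maxSubsequence, maxSubsequence_alt, hk0, hkn]
    · exact pv_main nums k (by unfold Pre_maxSubsequence at hpre; omega) (by omega)
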